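-- pv_equiv track=rewrite | github.com/tadex909/Chromatic-induction | fase_final/codigos_auxiliares/Analysis.py | buildhist
-- ===== SOURCE A (Python) =====
-- def buildhist( neg , pos):
--     neg=list(neg)
--     pos=list(pos)
--     tot= neg + pos
--     bins = list( set(tot))
--     bins.sort()
--     y=[]
--     for a in bins:
--         y.append(neg.count(a))
--     return (bins,y)
-- ===== SOURCE B (Python) =====
-- def buildhist(neg, pos):
--     neg = list(neg)
--     pos = list(pos)
--     bins = list(set(neg + pos))
--     bins.sort()
--     sneg = sorted(neg)
--     n = len(sneg)
--     y = []
--     i = 0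
--     for b in bins:
--         c = 0
--         while i < n and sneg[i] == b:
--             i += 1
--             c += 1
--         y.append(c)
--     return (bins, y)
-- ===== Notes on version B (the rewrite author's own statement) =====
-- stated objective: faster
-- what changed: B sorts neg once and replaces A's per-bin neg.count scan by a single two-pointer merge walk over the sorted bins and sorted neg, counting each bin's run of equal elements in one linear pass.
import Mathlib
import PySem

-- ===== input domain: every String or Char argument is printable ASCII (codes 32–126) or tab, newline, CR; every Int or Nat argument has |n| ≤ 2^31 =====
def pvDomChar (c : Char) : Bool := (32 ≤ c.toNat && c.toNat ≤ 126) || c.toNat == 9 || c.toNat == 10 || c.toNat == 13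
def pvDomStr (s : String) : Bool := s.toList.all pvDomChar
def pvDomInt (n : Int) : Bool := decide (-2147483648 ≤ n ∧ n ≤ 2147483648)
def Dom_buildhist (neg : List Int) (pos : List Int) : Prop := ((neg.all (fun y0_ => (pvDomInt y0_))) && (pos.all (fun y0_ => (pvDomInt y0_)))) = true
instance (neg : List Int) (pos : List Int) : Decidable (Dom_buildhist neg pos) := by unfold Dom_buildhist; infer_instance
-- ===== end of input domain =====

-- B sorts neg once and counts each bin's run in a single merge walk instead of A's per-bin neg.count scan (faster).
-- ===== PORT A =====
def buildhist (neg : List Int) (pos : List Int) : List Int × List Int :=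
  let tot := neg ++ pos
  let bins := PySem.List.sorted (PySem.Set.ofList tot) (fun x => x) false
  let y := bins.foldl (fun acc a => acc ++ [(PySem.List.count neg a : Int)]) []
  (bins, y)

-- ===== PORT B =====
-- the 'for b in bins' loop with its inner 'while' advancing pointer i through sneg:
-- the pointer's tail 's' replaces index i; the while loop consumes the run of b's at its front.
def buildhistGo (bins : List Int) (s : List Int) : List Int :=
  match bins with
  | [] => []
  | b :: bs =>
    ((s.takeWhile (fun x => x == b)).length : Int) :: buildhistGo bs (s.dropWhile (fun x => x == b))

def buildhist_alt (neg : List Int) (pos : List Int) : List Int × List Int :=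
  let bins := PySem.List.sorted (PySem.Set.ofList (neg ++ pos)) (fun x => x) false
  let sneg := PySem.List.sorted neg (fun x => x) false
  (bins, buildhistGo bins sneg)

-- ===== PRECONDITION & SPEC =====
def Spec_buildhist (neg : List Int) (pos : List Int) (out : List Int × List Int) : Prop := out = buildhist_alt neg pos
instance (neg : List Int) (pos : List Int) (out : List Int × List Int) : Decidable (Spec_buildhist neg pos out) := by unfold Spec_buildhist; infer_instance

-- ===== CLAIM (what is proved, stated in full; the proofs are below) =====
def Claim_equal_buildhist : Prop := ∀ (neg : List Int) (pos : List Int), Dom_buildhist neg pos → Spec_buildhist neg pos (buildhist neg pos)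

-- ===== LEMMAS AND PROOFS =====

-- On a sorted list whose elements are all ≥ b, the run taken by takeWhile (== b) is all
-- occurrences of b, and everything left by dropWhile is > b.
lemma pv_tw_count (b : Int) : ∀ (s : List Int), s.Pairwise (· ≤ ·) → (∀ x ∈ s, b ≤ x) →
    (s.takeWhile (fun x => x == b)).length = s.count b ∧
    (∀ x ∈ s.dropWhile (fun x => x == b), b < x) := by
  intro s
  induction s with
  | nil => simp
  | cons a t ih =>
    intro hp hge
    rcases List.pairwise_cons.mp hp with ⟨hat, hpt⟩
    by_cases hab : a = b
    · subst hab
      have h := ih hpt (fun x hx => le_trans (hge a (by simp)) (hat x hx))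
      refine ⟨?_, ?_⟩
      · simpa [List.takeWhile, List.count_cons] using h.1
      · simpa [List.dropWhile] using h.2
    · have hba : b < a := lt_of_le_of_ne (hge a (by simp)) (Ne.symm hab)
      have hnot : ∀ x ∈ a :: t, b < x := by
        intro x hx
        rcases List.mem_cons.mp hx with rfl | hx
        · exact hba
        · exact lt_of_lt_of_le hba (hat x hx)
      have hmem : b ∉ a :: t := fun hb => lt_irrefl b (hnot b hb)
      have habf : (a == b) = false := by simp [hab]
      refine ⟨?_, ?_⟩
      · simp [List.takeWhile, habf, List.count_eq_zero.mpr hmem]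
      · simpa [List.dropWhile, habf] using hnot

lemma pv_go_eq_map : ∀ (bins s : List Int), bins.Pairwise (· < ·) → s.Pairwise (· ≤ ·) →
    (∀ x ∈ s, x ∈ bins) → buildhistGo bins s = bins.map (fun b => (s.count b : Int)) := by
  intro bins
  induction bins with
  | nil =>
    intro s _ _ hmem
    cases s with
    | nil => rfl
    | cons a t => exact absurd (hmem a (by simp)) (by simp)
  | cons b bs ih =>
    intro s hbins hs hmem
    rcases List.pairwise_cons.mp hbins with ⟨hblt, hbs⟩
    have hge : ∀ x ∈ s, b ≤ x := by
      intro x hx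
      rcases List.mem_cons.mp (hmem x hx) with rfl | hx'
      · exact le_refl x
      · exact le_of_lt (hblt x hx')
    have h := pv_tw_count b s hs hge
    have hdropsub : s.dropWhile (fun x => x == b) ⊆ s := (List.dropWhile_sublist _).subset
    have hdp : (s.dropWhile (fun x => x == b)).Pairwise (· ≤ ·) :=
      hs.sublist (List.dropWhile_sublist _)
    have hdm : ∀ x ∈ s.dropWhile (fun x => x == b), x ∈ bs := by
      intro x hx
      rcases List.mem_cons.mp (hmem x (hdropsub hx)) with rfl | hx'
      · exact absurd (h.2 x hx) (lt_irrefl x)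
      · exact hx'
    have hrec := ih (s.dropWhile (fun x => x == b)) hbs hdp hdm
    have hcount : ∀ b' ∈ bs, (s.dropWhile (fun x => x == b)).count b' = s.count b' := by
      intro b' hb'
      have hb'ne : b < b' := hblt b' hb'
      have htk : (s.takeWhile (fun x => x == b)).count b' = 0 := by
        refine List.count_eq_zero.mpr ?_
        intro hmem'
        have := List.mem_takeWhile_imp hmem'
        simp only [beq_iff_eq] at this
        omega
      conv_rhs => rw [← List.takeWhile_append_dropWhile (p := fun x => x == b) (l := s)]
      rw [List.count_append, htk]
      omega
    simp only [buildhistGo, List.map_cons, hrec, h.1]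
    congr 1
    exact List.map_congr_left (fun b' hb' => by rw [hcount b' hb'])

-- ===== VERDICT (by name: the statement is the Claim_ definition above) =====
theorem buildhist_spec : Claim_equal_buildhist := by
  intro neg pos _
  unfold Spec_buildhist buildhist buildhist_alt
  simp only [PySem.List.foldl_append_singleton_eq_map]
  refine Prod.ext rfl ?_
  have hbins := PySem.List.sorted_ofList_pairwise_lt (xs := neg ++ pos)
  have hs : (PySem.List.sorted neg (fun x => x) false).Pairwise (· ≤ ·) := by
    simpa using PySem.List.sorted_pairwise (xs := neg) (key := fun x => x)
  have hmem : ∀ x ∈ PySem.List.sorted neg (fun x => x) false,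
      x ∈ PySem.List.sorted (PySem.Set.ofList (neg ++ pos)) (fun x => x) false := by
    intro x hx
    rw [PySem.List.mem_sorted] at hx ⊢
    exact (PySem.Set.mem_ofList _ _).mpr (List.mem_append_left pos hx)
  rw [pv_go_eq_map _ _ hbins hs hmem]
  refine List.map_congr_left (fun b _ => ?_)
  rw [PySem.List.count_eq,
    (PySem.List.sorted_perm (xs := neg) (key := fun x => x) (rev := false)).count_eq b]
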